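-- pv_equiv track=rewrite | github.com/modelscope/modelscope-agent | modelscope_agent/utils/utils.py | get_last_one_line_context
-- ===== SOURCE A (Python) =====
-- def get_last_one_line_context(text):
--     lines = text.split('\n')
--     n = len(lines)
--     res = ''
--     for i in range(n - 1, -1, -1):
--         if lines[i].strip():
--             res = lines[i]
--             break
--     return res
-- ===== SOURCE B (Python) =====
-- def get_last_one_line_context(text):
--     res = ''
--     for line in text.split('\n'):
--         if line.strip():
--             res = line
--     return res
-- ===== Notes on version B (the rewrite author's own statement) =====
-- stated objective: alternative
-- what changed: Replaces the backward index search with early break by a single forward pass that keeps the most recent non-blank line in an accumulator.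
import Mathlib
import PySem

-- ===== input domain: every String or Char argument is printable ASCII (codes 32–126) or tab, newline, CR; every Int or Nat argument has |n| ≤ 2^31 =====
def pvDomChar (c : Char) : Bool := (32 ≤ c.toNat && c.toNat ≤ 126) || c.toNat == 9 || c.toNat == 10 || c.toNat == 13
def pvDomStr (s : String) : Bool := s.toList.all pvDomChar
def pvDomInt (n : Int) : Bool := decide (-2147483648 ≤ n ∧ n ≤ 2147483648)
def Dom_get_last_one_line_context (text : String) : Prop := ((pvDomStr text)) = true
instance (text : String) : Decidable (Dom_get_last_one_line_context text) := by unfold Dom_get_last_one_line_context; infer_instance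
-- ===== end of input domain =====

-- B scans the lines forward keeping the last non-blank line seen, instead of A's backward search with break; same cost, different decomposition.

-- ===== PORT A =====
-- the loop 'for i in range(n-1, -1, -1): if lines[i].strip(): res = lines[i]; break'
-- as structural countdown on the index: argument k means the next index examined is k-1
def pvALoop (lines : List (List Char)) : Nat → List Char
  | 0 => []
  | k+1 =>
    let line := PySem.List.pyGetD lines (k : Int) []
    if PySem.Chars.strip line ≠ [] then line else pvALoop lines k

def get_last_one_line_context (text : String) : String :=
  let lines := PySem.Chars.splitOn text.toList ['\n']
  String.ofList (pvALoop lines lines.length)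

-- ===== PORT B =====
def get_last_one_line_context_alt (text : String) : String :=
  String.ofList ((PySem.Chars.splitOn text.toList ['\n']).foldl
    (fun res line => if PySem.Chars.strip line ≠ [] then line else res) [])

-- ===== PRECONDITION & SPEC =====
def Spec_get_last_one_line_context (text : String) (out : String) : Prop := out = get_last_one_line_context_alt text
instance (text : String) (out : String) : Decidable (Spec_get_last_one_line_context text out) := by unfold Spec_get_last_one_line_context; infer_instance

-- ===== CLAIM (what is proved, stated in full; the proofs are below) =====
def Claim_equal_get_last_one_line_context : Prop := ∀ (text : String), Dom_get_last_one_line_context text → Spec_get_last_one_line_context text (get_last_one_line_context text)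

-- ===== LEMMAS AND PROOFS =====

-- the countdown loop only reads indices below k, so a trailing element is invisible while k ≤ ls.length
lemma pvALoop_append_of_le (ls : List (List Char)) (x : List Char) (k : Nat) (hk : k ≤ ls.length) :
    pvALoop (ls ++ [x]) k = pvALoop ls k := by
  induction k with
  | zero => rfl
  | succ k ih =>
    have hk' : k < ls.length := hk
    have hget : PySem.List.pyGetD (ls ++ [x]) (k : Int) [] = PySem.List.pyGetD ls (k : Int) [] := by
      simp [PySem.List.pyGetD_natCast, List.getD, List.getElem?_append_left hk']
    simp only [pvALoop, hget, ih (le_of_lt hk')]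

lemma pvALoop_eq_foldl (ls : List (List Char)) :
    pvALoop ls ls.length =
      ls.foldl (fun res line => if PySem.Chars.strip line ≠ [] then line else res) [] := by
  induction ls using List.reverseRecOn with
  | nil => rfl
  | append_singleton ls x ih =>
    have hget : PySem.List.pyGetD (ls ++ [x]) ((ls.length : Nat) : Int) [] = x := by
      simp [PySem.List.pyGetD_natCast, List.getD]
    simp only [List.length_append, List.length_singleton, List.foldl_append, List.foldl_cons,
      List.foldl_nil, pvALoop, hget, pvALoop_append_of_le ls x ls.length le_rfl, ih]

-- ===== VERDICT (by name: the statement is the Claim_ definition above) =====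
theorem get_last_one_line_context_spec : Claim_equal_get_last_one_line_context := by
  intro text _
  unfold Spec_get_last_one_line_context get_last_one_line_context get_last_one_line_context_alt
  exact congrArg String.ofList (pvALoop_eq_foldl _)
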